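-- pv_equiv track=rewrite | github.com/shadysedhom/ngu-visualizer | app.py | clean_telemetry_key
-- ===== SOURCE A (Python) =====
-- PRODUCT_ALIASES = {
--     'ASH_COATED_OSMIUM': ['OSM', 'ASH', 'OSMIUM'],
--     'INTARIAN_PEPPER_ROOT': ['PEP', 'INT', 'PEPPER', 'ROOT'],
--     'HYDROGEL_PACK': ['HYDROGEL', 'HYP'],
--     'VELVETFRUIT_EXTRACT': ['VELVET', 'VELVETFRUIT', 'VFE'],
--     'VEV_4000': ['VEV4000'],
--     'VEV_4500': ['VEV4500'],
--     'VEV_5000': ['VEV5000'],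
--     'VEV_5100': ['VEV5100'],
--     'VEV_5200': ['VEV5200'],
--     'VEV_5300': ['VEV5300'],
--     'VEV_5400': ['VEV5400'],
--     'VEV_5500': ['VEV5500'],
--     'VEV_6000': ['VEV6000'],
--     'VEV_6500': ['VEV6500'],
-- }
--
-- def clean_telemetry_key(raw_key, product):
--     key = raw_key.strip()
--     aliases = PRODUCT_ALIASES.get(product, [])
--     for alias in aliases + [product]:
--         if key.upper().startswith(alias):
--             key = key[len(alias):].strip()
--             break
--     key = key.strip(" -_:")
--     return key.lower().replace(" ", "_")
-- ===== SOURCE B (Python) =====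
-- PRODUCT_ALIASES = {
--     'ASH_COATED_OSMIUM': ['OSM', 'ASH', 'OSMIUM'],
--     'INTARIAN_PEPPER_ROOT': ['PEP', 'INT', 'PEPPER', 'ROOT'],
--     'HYDROGEL_PACK': ['HYDROGEL', 'HYP'],
--     'VELVETFRUIT_EXTRACT': ['VELVET', 'VELVETFRUIT', 'VFE'],
--     'VEV_4000': ['VEV4000'],
--     'VEV_4500': ['VEV4500'],
--     'VEV_5000': ['VEV5000'],
--     'VEV_5100': ['VEV5100'],
--     'VEV_5200': ['VEV5200'],
--     'VEV_5300': ['VEV5300'],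
--     'VEV_5400': ['VEV5400'],
--     'VEV_5500': ['VEV5500'],
--     'VEV_6000': ['VEV6000'],
--     'VEV_6500': ['VEV6500'],
-- }
--
--
-- def clean_telemetry_key(raw_key, product):
--     # Hash-indexed variant: instead of scanning the alias list with startswith,
--     # index every candidate prefix by its first position once, then probe the
--     # few distinct prefix LENGTHS against the uppercased key and keep the
--     # candidate with the smallest position (= first-match-wins order).
--     key = raw_key.strip()
--     parts = PRODUCT_ALIASES.get(product, []) + [product]
--     first_pos = {}
--     for i, p in enumerate(parts):
--         first_pos.setdefault(p, i)
--     ku = key.upper()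
--     best = None
--     for length in dict.fromkeys(len(p) for p in parts):
--         if length <= len(ku):
--             i = first_pos.get(ku[:length])
--             if i is not None and (best is None or i < best[0]):
--                 best = (i, length)
--     if best is not None:
--         key = key[best[1]:].strip()
--     key = key.strip(" -_:")
--     return key.lower().replace(" ", "_")
-- ===== Notes on version B (the rewrite author's own statement) =====
-- stated objective: alternative
-- what changed: Replaces A's ordered startswith-scan over the alias list by building a hash index (first position of each candidate prefix) once, probing only the distinct prefix lengths against the uppercased key, and keeping the hit with the smallest original position.
import Mathlib
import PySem

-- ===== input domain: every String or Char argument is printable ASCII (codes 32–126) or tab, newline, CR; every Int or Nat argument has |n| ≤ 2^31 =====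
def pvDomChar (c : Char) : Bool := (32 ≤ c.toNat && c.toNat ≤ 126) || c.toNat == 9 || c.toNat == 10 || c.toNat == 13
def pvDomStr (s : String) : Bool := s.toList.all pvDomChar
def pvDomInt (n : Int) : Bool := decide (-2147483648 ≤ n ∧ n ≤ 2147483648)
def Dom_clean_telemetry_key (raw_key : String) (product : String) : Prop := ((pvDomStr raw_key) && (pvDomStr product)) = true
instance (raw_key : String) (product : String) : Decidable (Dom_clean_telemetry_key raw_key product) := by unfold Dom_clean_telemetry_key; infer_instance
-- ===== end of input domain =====

-- B replaces A's ordered startswith-scan over the alias list by a hash index of the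
-- candidate prefixes probed at their distinct lengths (alternative algorithm, same output).

-- module constant PRODUCT_ALIASES (shared data, used by both ports)
def pvProductAliases : PySem.Dict String (List String) :=
  { items := [
      ("ASH_COATED_OSMIUM", ["OSM", "ASH", "OSMIUM"]),
      ("INTARIAN_PEPPER_ROOT", ["PEP", "INT", "PEPPER", "ROOT"]),
      ("HYDROGEL_PACK", ["HYDROGEL", "HYP"]),
      ("VELVETFRUIT_EXTRACT", ["VELVET", "VELVETFRUIT", "VFE"]),
      ("VEV_4000", ["VEV4000"]),
      ("VEV_4500", ["VEV4500"]),
      ("VEV_5000", ["VEV5000"]),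
      ("VEV_5100", ["VEV5100"]),
      ("VEV_5200", ["VEV5200"]),
      ("VEV_5300", ["VEV5300"]),
      ("VEV_5400", ["VEV5400"]),
      ("VEV_5500", ["VEV5500"]),
      ("VEV_6000", ["VEV6000"]),
      ("VEV_6500", ["VEV6500"]) ] }

-- ===== PORT A =====
-- A's for-loop with break: try each candidate in order, strip the first prefix match
def cleanAliasLoop (key : String) : List String → String
  | [] => key
  | a :: rest =>
      if PySem.Str.startswith (PySem.Str.upper key) a then
        PySem.Str.strip (PySem.Str.slice key (some (PySem.Str.len a)) none)
      else cleanAliasLoop key rest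

def clean_telemetry_key (raw_key : String) (product : String) : String :=
  let key := PySem.Str.strip raw_key
  let aliases := pvProductAliases.getD product []
  let key := cleanAliasLoop key (aliases ++ [product])
  let key := PySem.Str.stripChars key " -_:"
  PySem.Str.replace (PySem.Str.lower key) " " "_"

-- ===== PORT B =====
def clean_telemetry_key_alt (raw_key : String) (product : String) : String :=
  let key := PySem.Str.strip raw_key
  let parts := pvProductAliases.getD product [] ++ [product]
  -- first_pos = {}; for i, p in enumerate(parts): first_pos.setdefault(p, i)
  let firstPos : PySem.Dict String Int :=
    (PySem.List.enumerate parts 0).foldl (fun d ip => d.setdefault ip.2 ip.1) PySem.Dict.empty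
  let ku := PySem.Str.upper key
  -- for length in dict.fromkeys(len(p) for p in parts): probe ku[:length], keep smallest position
  let best : Option (Int × Int) :=
    (PySem.List.dedup (parts.map PySem.Str.len)).foldl
      (fun best L =>
        if L ≤ PySem.Str.len ku then
          match firstPos.get? (PySem.Str.slice ku none (some L)) with
          | some i =>
            match best with
            | none => some (i, L)
            | some b => if i < b.1 then some (i, L) else best
          | none => best
        else best) none
  let key := match best with
    | some b => PySem.Str.strip (PySem.Str.slice key (some b.2) none)
    | none => key
  let key := PySem.Str.stripChars key " -_:"
  PySem.Str.replace (PySem.Str.lower key) " " "_"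

-- ===== PRECONDITION & SPEC =====
def Spec_clean_telemetry_key (raw_key : String) (product : String) (out : String) : Prop := out = clean_telemetry_key_alt raw_key product
instance (raw_key : String) (product : String) (out : String) : Decidable (Spec_clean_telemetry_key raw_key product out) := by unfold Spec_clean_telemetry_key; infer_instance

-- ===== CLAIM (what is proved, stated in full; the proofs are below) =====
def Claim_equal_clean_telemetry_key : Prop := ∀ (raw_key : String) (product : String), Dom_clean_telemetry_key raw_key product → Spec_clean_telemetry_key raw_key product (clean_telemetry_key raw_key product)

-- ===== LEMMAS AND PROOFS =====

-- B's loop body, named for the proofs: the candidate produced by one length, and the min-keeping step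
def pvCand (fi : PySem.Dict String Int) (ku : String) (L : Int) : Option (Int × Int) :=
  if L ≤ PySem.Str.len ku then (fi.get? (PySem.Str.slice ku none (some L))).map (fun i => (i, L)) else none

def pvStep (best : Option (Int × Int)) (x : Int × Int) : Option (Int × Int) :=
  match best with
  | none => some x
  | some b => if x.1 < b.1 then some x else best

-- the setdefault-fold over enumerate is first-occurrence indexing
theorem pvFirstPos_get? (parts : List String) (k : Int) (d : PySem.Dict String Int) (q : String) :
    ((PySem.List.enumerate parts k).foldl (fun d ip => d.setdefault ip.2 ip.1) d).get? q
      = match d.get? q with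
        | some v => some v
        | none => (List.idxOf? q parts).map (fun i : Nat => k + i) := by
  induction parts generalizing k d with
  | nil => simp [PySem.List.enumerate]; cases d.get? q <;> simp
  | cons x t ih =>
      have he : PySem.List.enumerate (x :: t) k = (k, x) :: PySem.List.enumerate t (k + 1) := by
        simp [PySem.List.enumerate]
      rw [he]
      simp only [List.foldl_cons]
      rw [ih]
      by_cases hq : q = x
      · subst hq
        rw [PySem.Dict.get?_setdefault_self]
        cases hd : d.get? q <;> simp [List.idxOf?_cons]
      · rw [PySem.Dict.get?_setdefault_of_ne _ _ hq]
        cases hd : d.get? q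
        · simp only [List.idxOf?_cons, beq_iff_eq, Ne.symm hq, if_false]
          cases List.idxOf? q t
          · simp
          · simp; omega
        · simp

-- a fold whose body drops `none`s is a fold over the filterMap
theorem pvFoldl_filterMap {α β γ : Type} (f : α → Option β) (g : γ → β → γ) (l : List α) (init : γ) :
    l.foldl (fun a x => (f x).elim a (g a)) init
      = (l.filterMap f).foldl g init := by
  induction l generalizing init with
  | nil => rfl
  | cons x t ih => cases hf : f x <;> simp [hf, ih]

theorem pvStep_stays (l : List (Int × Int)) (i0 L0 : Int)
    (hall : ∀ x ∈ l, i0 ≤ x.1) :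
    l.foldl pvStep (some (i0, L0)) = some (i0, L0) := by
  induction l with
  | nil => rfl
  | cons x t ih =>
      have h1 := hall x (by simp)
      have hstep : pvStep (some (i0, L0)) x = some (i0, L0) := by
        simp only [pvStep]
        rw [if_neg (by omega)]
      rw [List.foldl_cons, hstep]
      exact ih (fun y hy => hall y (List.mem_cons_of_mem _ hy))

theorem pvStep_min (l : List (Int × Int)) (i0 L0 : Int)
    (hmem : (i0, L0) ∈ l)
    (hall : ∀ x ∈ l, i0 ≤ x.1 ∧ (x.1 = i0 → x = (i0, L0)))
    (acc : Option (Int × Int))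
    (hacc : acc = none ∨ ∃ b, acc = some b ∧ i0 < b.1) :
    l.foldl pvStep acc = some (i0, L0) := by
  induction l generalizing acc with
  | nil => simp at hmem
  | cons x t ih =>
      by_cases hx : x = (i0, L0)
      · have hstep : pvStep acc x = some (i0, L0) := by
          rcases hacc with h | ⟨b, hb, hlt⟩
          · rw [h, hx]; rfl
          · rw [hb, hx]
            simp only [pvStep]
            rw [if_pos hlt]
        rw [List.foldl_cons, hstep]
        exact pvStep_stays t i0 L0 (fun y hy => (hall y (List.mem_cons_of_mem _ hy)).1)
      · have hx1 : i0 < x.1 := by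
          have h := hall x (List.mem_cons_self)
          by_cases he : x.1 = i0
          · exact absurd (h.2 he) hx
          · have := h.1; omega
        have hmem' : (i0, L0) ∈ t := by
          rcases List.mem_cons.mp hmem with h | h
          · exact absurd h.symm hx
          · exact h
        rw [List.foldl_cons]
        refine ih hmem' (fun y hy => hall y (List.mem_cons_of_mem _ hy)) (pvStep acc x) ?_
        right
        rcases hacc with h | ⟨b, hb, hlt⟩
        · exact ⟨x, by rw [h]; rfl, hx1⟩
        · subst hb
          by_cases hc : x.1 < b.1
          · exact ⟨x, by simp only [pvStep]; rw [if_pos hc], hx1⟩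
          · exact ⟨b, by simp only [pvStep]; rw [if_neg hc], hlt⟩

-- A's loop is find? over the candidate list
theorem cleanAliasLoop_eq_find (key : String) (parts : List String) :
    cleanAliasLoop key parts
      = match parts.find? (fun a => PySem.Str.startswith (PySem.Str.upper key) a) with
        | some a => PySem.Str.strip (PySem.Str.slice key (some (PySem.Str.len a)) none)
        | none => key := by
  induction parts with
  | nil => rfl
  | cons x t ih =>
      simp only [cleanAliasLoop, List.find?_cons]
      cases hx : PySem.Str.startswith (PySem.Str.upper key) x
      · rw [ih]; simp only [Bool.false_eq_true, if_false]
      · simp only [if_true]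

-- a looked-up candidate names a part that is a prefix of the uppercased key
theorem pvCand_shape (key : String) (parts : List String) {L : Int} {x : Int × Int}
    (hL0 : 0 ≤ L)
    (hc : pvCand ((PySem.List.enumerate parts 0).foldl (fun d ip => d.setdefault ip.2 ip.1)
            (PySem.Dict.empty : PySem.Dict String Int)) (PySem.Str.upper key) L = some x) :
    ∃ j : Nat, ∃ hj : j < parts.length,
      x = ((j : Int), L) ∧ L ≤ PySem.Str.len (PySem.Str.upper key) ∧
      parts[j].toList = (PySem.Str.upper key).toList.take L.toNat ∧
      (∀ j' : Nat, ∀ hj' : j' < j, parts[j']'(lt_trans hj' hj) ≠ parts[j]) := by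
  unfold pvCand at hc
  split_ifs at hc with hLn
  rw [pvFirstPos_get? parts 0 PySem.Dict.empty] at hc
  simp only [PySem.Dict.get?_empty] at hc
  rcases Option.map_eq_some_iff.mp hc with ⟨i, hi, hxeq⟩
  rcases Option.map_eq_some_iff.mp hi with ⟨j, hj, hieq⟩
  rcases List.idxOf?_eq_some_iff.mp hj with ⟨hjlen, hget, hmin⟩
  refine ⟨j, hjlen, ?_, hLn, ?_, ?_⟩
  · rw [← hxeq]
    have : i = (j : Int) := by omega
    rw [this]
  · rw [hget]
    simp only [PySem.Str.toList_slice, PySem.Chars.slice_eq_listSlice]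
    rw [PySem.List.slice_to _ hL0]
  · intro j' hj' hpe
    exact hmin j' hj' (by rw [hpe, hget])

-- the core: A's ordered scan equals B's hash-index-and-min fold
theorem pvMiddle_eq (key : String) (parts : List String) :
    cleanAliasLoop key parts
      = (match
          (PySem.List.dedup (parts.map PySem.Str.len)).foldl
            (fun best L =>
              if L ≤ PySem.Str.len (PySem.Str.upper key) then
                match ((PySem.List.enumerate parts 0).foldl
                        (fun d ip => d.setdefault ip.2 ip.1)
                        (PySem.Dict.empty : PySem.Dict String Int)).get?
                        (PySem.Str.slice (PySem.Str.upper key) none (some L)) with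
                | some i =>
                  match best with
                  | none => some (i, L)
                  | some b => if i < b.1 then some (i, L) else best
                | none => best
              else best) none with
        | some b => PySem.Str.strip (PySem.Str.slice key (some b.2) none)
        | none => key) := by
  set ku := PySem.Str.upper key with hku
  set fid : PySem.Dict String Int :=
    (PySem.List.enumerate parts 0).foldl (fun d ip => d.setdefault ip.2 ip.1)
      (PySem.Dict.empty : PySem.Dict String Int) with hfid
  have hbody : (fun (best : Option (Int × Int)) (L : Int) =>
        if L ≤ PySem.Str.len ku then
          match fid.get? (PySem.Str.slice ku none (some L)) with
          | some i =>
            match best with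
            | none => some (i, L)
            | some b => if i < b.1 then some (i, L) else best
          | none => best
        else best)
      = (fun best L => (pvCand fid ku L).elim best (pvStep best)) := by
    funext best L
    simp only [pvCand]
    split_ifs with hL
    · cases fid.get? (PySem.Str.slice ku none (some L))
      · rfl
      · simp [pvStep]
    · rfl
  rw [hbody, pvFoldl_filterMap, cleanAliasLoop_eq_find]
  have hlens : ∀ L ∈ PySem.List.dedup (parts.map PySem.Str.len), 0 ≤ L := by
    intro L hL
    rcases List.mem_map.mp ((PySem.List.mem_dedup _ _).mp hL) with ⟨a, _, rfl⟩
    simp [PySem.Str.len]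
  cases hfind : parts.find? (fun a => PySem.Str.startswith ku a) with
  | none =>
      have hnil : (PySem.List.dedup (parts.map PySem.Str.len)).filterMap (pvCand fid ku) = [] := by
        rw [List.filterMap_eq_nil_iff]
        intro L hL
        cases hc : pvCand fid ku L with
        | none => rfl
        | some x =>
            exfalso
            rcases pvCand_shape key parts (hlens L hL) (hfid ▸ hc) with
              ⟨j, hj, _, _, hpref, _⟩
            have hmemj : parts[j] ∈ parts := List.getElem_mem hj
            have hfalse := List.find?_eq_none.mp hfind _ hmemj
            have htrue : PySem.Str.startswith ku parts[j] = true := by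
              rw [PySem.Str.startswith_eq, PySem.Chars.startswith_iff, hpref]
              exact List.take_prefix _ _
            rw [htrue] at hfalse
            exact absurd hfalse (by simp)
      rw [hnil]
      rfl
  | some a0 =>
      rcases List.find?_eq_some_iff_getElem.mp hfind with ⟨hp, j0, hj0, hgeta, hmin⟩
      -- the first matching candidate, as B finds it
      have ha0pre : a0.toList <+: ku.toList := by
        rw [PySem.Str.startswith_eq, PySem.Chars.startswith_iff] at hp
        exact hp
      have htake : ku.toList.take a0.toList.length = a0.toList :=
        (List.prefix_iff_eq_take.mp ha0pre).symm
      have hL0n : PySem.Str.len a0 ≤ PySem.Str.len ku := by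
        have := ha0pre.length_le
        simp only [PySem.Str.len]
        omega
      have hq0 : PySem.Str.slice ku none (some (PySem.Str.len a0)) = a0 := by
        rw [← String.toList_inj]
        simp only [PySem.Str.toList_slice, PySem.Chars.slice_eq_listSlice]
        rw [PySem.List.slice_to _ (by simp [PySem.Str.len])]
        simp only [PySem.Str.len, Int.toNat_natCast]
        exact htake
      have hidx : List.idxOf? a0 parts = some j0 := by
        rw [List.idxOf?_eq_some_iff]
        refine ⟨hj0, hgeta, ?_⟩
        intro j hjlt hje
        have := hmin j (by omega)
        rw [hje, hp] at this
        simp at this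
      have hcand0 : pvCand fid ku (PySem.Str.len a0) = some ((j0 : Int), PySem.Str.len a0) := by
        unfold pvCand
        rw [if_pos hL0n, hfid, pvFirstPos_get? parts 0 PySem.Dict.empty, hq0]
        simp [PySem.Dict.get?_empty, hidx]
      have hmemlens : PySem.Str.len a0 ∈ PySem.List.dedup (parts.map PySem.Str.len) := by
        rw [PySem.List.mem_dedup]
        exact List.mem_map.mpr ⟨a0, hgeta ▸ List.getElem_mem hj0, rfl⟩
      have hmemc : ((j0 : Int), PySem.Str.len a0)
          ∈ (PySem.List.dedup (parts.map PySem.Str.len)).filterMap (pvCand fid ku) :=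
        List.mem_filterMap.mpr ⟨PySem.Str.len a0, hmemlens, hcand0⟩
      have hall : ∀ x ∈ (PySem.List.dedup (parts.map PySem.Str.len)).filterMap (pvCand fid ku),
          ((j0 : Int)) ≤ x.1 ∧ (x.1 = (j0 : Int) → x = ((j0 : Int), PySem.Str.len a0)) := by
        intro x hx
        rcases List.mem_filterMap.mp hx with ⟨L, hLmem, hc⟩
        rcases pvCand_shape key parts (hlens L hLmem) (hfid ▸ hc) with
          ⟨j, hj, hxeq, hLn, hpref, hfirst⟩
        -- parts[j] is a prefix of ku, hence the scan index j0 is ≤ j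
        have hjp : PySem.Str.startswith ku parts[j] = true := by
          rw [PySem.Str.startswith_eq, PySem.Chars.startswith_iff, hpref]
          exact List.take_prefix _ _
        have hj0j : j0 ≤ j := by
          by_contra hcon
          have := hmin j (by omega)
          rw [hjp] at this
          simp at this
        subst hxeq
        constructor
        · simpa using hj0j
        · intro hje
          have hjj : j = j0 := by
            simp only at hje
            omega
          subst hjj
          have hqa : parts[j] = a0 := hgeta
          have hlen : L = PySem.Str.len a0 := by
            have h3 : 0 ≤ L := hlens L hLmem
            have h2 : L.toNat ≤ (PySem.Str.upper key).toList.length := by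
              simp only [PySem.Str.len] at hLn
              omega
            have h1 : parts[j].toList.length = min L.toNat ((PySem.Str.upper key).toList.length) := by
              rw [hpref, List.length_take]
            rw [hqa] at h1
            simp only [PySem.Str.len]
            omega
          rw [hlen]
      rw [pvStep_min _ ((j0 : Int)) (PySem.Str.len a0) hmemc hall none (Or.inl rfl)]

-- ===== VERDICT (by name: the statement is the Claim_ definition above) =====
theorem clean_telemetry_key_spec : Claim_equal_clean_telemetry_key := by
  intro raw_key product _
  unfold Spec_clean_telemetry_key clean_telemetry_key clean_telemetry_key_alt
  dsimp only
  rw [pvMiddle_eq]
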